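-- pv_equiv track=rewrite | github.com/Carluuz/Harvard | CS50p/Week5/Pset5/test_plates/plates.py | mid_numbs
-- ===== SOURCE A (Python) =====
-- def mid_numbs(s):
--     first_n = None
--     for i, c in enumerate(s):
--         if c.isdigit():
--             first_n = i
--             break
--
--     if first_n is not None:
--         temp = s[first_n:]
--         return temp.isdigit()
--
--     return True
-- ===== SOURCE B (Python) =====
-- def mid_numbs(s):
--     seen_digit = False
--     for c in s:
--         if c.isdigit():
--             seen_digit = True
--         elif seen_digit:
--             return False
--     return True
-- ===== Notes on version B (the rewrite author's own statement) =====
-- stated objective: simpler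
-- what changed: Single-pass state machine with a seen_digit flag replaces A's two-phase locate-first-digit-then-slice-and-rescan; the s[first_n:] slice and its isdigit() rescan disappear.
import Mathlib
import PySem

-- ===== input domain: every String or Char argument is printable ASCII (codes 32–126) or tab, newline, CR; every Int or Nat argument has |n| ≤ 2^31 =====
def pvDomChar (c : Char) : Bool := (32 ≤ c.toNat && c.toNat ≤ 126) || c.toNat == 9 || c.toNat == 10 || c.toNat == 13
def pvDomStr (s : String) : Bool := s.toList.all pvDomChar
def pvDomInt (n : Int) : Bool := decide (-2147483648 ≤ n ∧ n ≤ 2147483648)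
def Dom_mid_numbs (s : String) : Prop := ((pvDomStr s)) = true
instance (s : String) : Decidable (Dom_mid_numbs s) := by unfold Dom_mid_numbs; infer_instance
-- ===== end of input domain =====

-- B replaces A's locate-first-digit-then-slice-and-rescan with a single-pass seen_digit state machine (objective: simpler).

-- ===== PORT A =====
-- A's enumerate/break loop: first index whose char is a digit (accumulator i = current index)
def midNumbsFindIdx : List Char → Nat → Option Nat
  | [], _ => none
  | c :: cs, i => if PySem.Chars.isdigit c then some i else midNumbsFindIdx cs (i + 1)

def mid_numbs (s : String) : Bool :=
  match midNumbsFindIdx s.toList 0 with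
  | some firstN => PySem.Chars.strIsdigit (PySem.List.slice s.toList (some (firstN : Int)) none)  -- temp = s[first_n:]; temp.isdigit()
  | none => true

-- ===== PORT B =====
-- B's one-pass loop: seen carries the seen_digit flag; a non-digit after a digit returns false
def midNumbsScan : List Char → Bool → Bool
  | [], _ => true
  | c :: cs, seen =>
    if PySem.Chars.isdigit c then midNumbsScan cs true
    else if seen then false
    else midNumbsScan cs seen

def mid_numbs_alt (s : String) : Bool := midNumbsScan s.toList false

-- ===== PRECONDITION & SPEC =====
def Spec_mid_numbs (s : String) (out : Bool) : Prop := out = mid_numbs_alt s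
instance (s : String) (out : Bool) : Decidable (Spec_mid_numbs s out) := by unfold Spec_mid_numbs; infer_instance

-- ===== CLAIM (what is proved, stated in full; the proofs are below) =====
def Claim_equal_mid_numbs : Prop := ∀ (s : String), Dom_mid_numbs s → Spec_mid_numbs s (mid_numbs s)

-- ===== LEMMAS AND PROOFS =====
theorem midNumbsFindIdx_shift (l : List Char) (i : Nat) :
    midNumbsFindIdx l i = (midNumbsFindIdx l 0).map (· + i) := by
  induction l generalizing i with
  | nil => simp [midNumbsFindIdx]
  | cons c cs ih =>
    by_cases h : PySem.Chars.isdigit c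
    · simp [midNumbsFindIdx, h]
    · simp only [midNumbsFindIdx, h, if_false, Bool.false_eq_true]
      rw [ih (i + 1), ih 1, Option.map_map]
      simp
      congr 1; funext j; omega

theorem midNumbsScan_true (l : List Char) :
    midNumbsScan l true = l.all PySem.Chars.isdigit := by
  induction l with
  | nil => simp [midNumbsScan]
  | cons c cs ih =>
    by_cases h : PySem.Chars.isdigit c <;> simp [midNumbsScan, h, ih]

theorem midNumbs_list (l : List Char) :
    (match midNumbsFindIdx l 0 with
     | some firstN => PySem.Chars.strIsdigit (l.drop firstN)
     | none => true) = midNumbsScan l false := by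
  induction l with
  | nil => simp [midNumbsFindIdx, midNumbsScan]
  | cons c cs ih =>
    by_cases h : PySem.Chars.isdigit c
    · simp [midNumbsFindIdx, midNumbsScan, h, PySem.Chars.strIsdigit, midNumbsScan_true]
    · simp only [midNumbsFindIdx, midNumbsScan, h, if_false, Bool.false_eq_true]
      rw [midNumbsFindIdx_shift cs 1]
      cases hf : midNumbsFindIdx cs 0 with
      | none => simpa [hf] using ih
      | some j => simpa [hf] using ih

-- ===== VERDICT (by name: the statement is the Claim_ definition above) =====
theorem mid_numbs_spec : Claim_equal_mid_numbs := by
  intro s _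
  unfold Spec_mid_numbs mid_numbs mid_numbs_alt
  rw [← midNumbs_list s.toList]
  cases hf : midNumbsFindIdx s.toList 0 with
  | none => rfl
  | some j => simp [PySem.List.slice_from_natCast]
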